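-- pv_equiv track=rewrite | github.com/open-power-ref-design/cluster-genesis | scripts/python/software_hosts.py | _get_groups_hosts_string
-- ===== SOURCE A (Python) =====
-- def _get_groups_hosts_dict(dynamic_inventory, top_level_group='all'):
--     """Get a dictionary of groups and hosts. Hosts will be listed under
--     their lowest level group membership only.
--
--     Args:
--         dynamic_inventory (dict): Dynamic inventory dictionary
--         top_level_group (str): Name of top level group
--
--     Returns:
--         dict: Dictionary containing groups with lists of hosts
--     """
--     groups_hosts_dict = {}
--     if 'hosts' in dynamic_inventory[top_level_group]:
--         if top_level_group not in groups_hosts_dict: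
--             groups_hosts_dict[top_level_group] = []
--         groups_hosts_dict[top_level_group] += (
--             dynamic_inventory[top_level_group]['hosts'])
--     if 'children' in dynamic_inventory[top_level_group]:
--         for child in dynamic_inventory[top_level_group]['children']:
--             groups_hosts_dict.update(_get_groups_hosts_dict(dynamic_inventory,
--                                                             child))
--     return groups_hosts_dict
--
-- def _get_groups_hosts_string(dynamic_inventory):
--     """Get a string containing groups and hosts formatted in the
--     Ansible inventory 'ini' style. Hosts will be listed under their
--     lowest level group membership only.
--
--     Args:
--         dynamic_inventory (dict): Dynamic inventory dictionary
--
--     Returns: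
--         str: String containing groups with lists of hosts
--     """
--     output_string = ""
--     groups_hosts_dict = _get_groups_hosts_dict(dynamic_inventory)
--     for host in groups_hosts_dict['all']:
--         output_string += host + "\n"
--     output_string += "\n"
--     for group, hosts in groups_hosts_dict.items():
--         if group != 'all':
--             output_string += "[" + group + "]\n"
--             for host in hosts:
--                 output_string += host + "\n"
--             output_string += "\n"
--     return output_string.rstrip()
-- ===== SOURCE B (Python) =====
-- def _get_groups_hosts_string(dynamic_inventory):
--     """Iterative re-implementation: an explicit stack replaces the
--     recursive dict merging.  The stack yields the same left-to-right
--     pre-order visit sequence; keeping the first occurrence of each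
--     group reproduces dict.update's overwrite-but-keep-position
--     behaviour (a revisited group always carries the same host list).
--     The output is assembled as a list of lines and joined once.
--     """
--     visits = []
--     stack = ['all']
--     while stack:
--         group = stack.pop()
--         entry = dynamic_inventory[group]
--         if 'hosts' in entry:
--             visits.append(group)
--         children = entry.get('children', [])
--         stack.extend(reversed(children))
--     order = list(dict.fromkeys(visits))
--     lines = list(dynamic_inventory['all']['hosts'])
--     lines.append('')
--     for group in order:
--         if group != 'all':
--             lines.append('[' + group + ']')
--             lines.extend(dynamic_inventory[group]['hosts'])
--             lines.append('')
--     return '\n'.join(lines).rstrip()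
-- ===== Notes on version B (the rewrite author's own statement) =====
-- stated objective: alternative
-- what changed: The recursive _get_groups_hosts_dict with its nested dict.update merging is replaced by an explicit-stack pre-order loop that records visits in a flat list (dict.fromkeys then yields the first-occurrence group order that dict.update produced), and the output is assembled as a list of lines joined once instead of repeated string concatenation.
import Mathlib
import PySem

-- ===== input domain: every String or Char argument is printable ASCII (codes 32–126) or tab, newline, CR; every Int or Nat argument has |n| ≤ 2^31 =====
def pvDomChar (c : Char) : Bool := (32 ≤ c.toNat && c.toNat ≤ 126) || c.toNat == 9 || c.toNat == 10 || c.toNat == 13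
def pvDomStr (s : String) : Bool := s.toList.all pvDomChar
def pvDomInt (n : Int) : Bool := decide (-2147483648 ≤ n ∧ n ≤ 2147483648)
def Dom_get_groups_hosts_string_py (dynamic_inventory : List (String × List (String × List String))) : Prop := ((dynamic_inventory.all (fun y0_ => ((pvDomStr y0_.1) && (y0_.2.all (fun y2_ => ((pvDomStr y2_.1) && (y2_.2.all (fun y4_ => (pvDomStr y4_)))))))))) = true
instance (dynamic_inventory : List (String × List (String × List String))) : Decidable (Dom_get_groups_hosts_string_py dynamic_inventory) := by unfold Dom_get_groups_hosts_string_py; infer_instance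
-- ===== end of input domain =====

-- B replaces the recursive dict-merging traversal by an explicit-stack pre-order loop plus a
-- first-occurrence pass and a single join; same cost class, different decomposition (objective: alternative).

-- Python dict lookup d[k] / d.get(k) on the association-list encoding of a dict: the list is
-- read as Python's dict() reads it (a later pair at the same key overwrites the earlier value).
def pvLk {α : Type} (d : List (String × α)) (k : String) : Option α :=
  (PySem.Dict.ofList d).get? k

theorem pvOfList_items_sub {α : Type} {d : List (String × α)} :
    ∀ {p : String × α}, p ∈ (PySem.Dict.ofList d).items → p ∈ d := by
  have H : ∀ (l : List (String × α)) (acc : PySem.Dict String α) (p : String × α),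
      p ∈ (acc.update l).items → p ∈ acc.items ∨ p ∈ l := by
    intro l
    induction l with
    | nil => intro acc p h; exact Or.inl h
    | cons q l ih =>
      intro acc p h
      have h2 : p ∈ ((acc.insert q.1 q.2).update l).items := h
      rcases ih (acc.insert q.1 q.2) p h2 with h3 | h3
      · rcases (PySem.Dict.mem_items_insert acc q.1 q.2 p).mp h3 with h4 | h4
        · rw [h4]; exact Or.inr (List.mem_cons_self)
        · exact Or.inl h4.1
      · exact Or.inr (List.mem_cons_of_mem _ h3)
  intro p h
  rcases H d PySem.Dict.empty p h with h2 | h2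
  · cases h2
  · exact h2

-- Termination measure for both traversals: number of inventory keys not yet on the current path.
def pvM (inv : List (String × List (String × List String))) (seen : List String) : Nat :=
  ((inv.map Prod.fst).filter (fun k => !(seen.contains k))).length

theorem pvLk_pair_mem {α : Type} {d : List (String × α)} {k : String} {v : α}
    (h : pvLk d k = some v) : (k, v) ∈ d := by
  unfold pvLk at h
  exact pvOfList_items_sub
    (((PySem.Dict.get?_eq_some_iff_mem_items _ k v (PySem.Dict.nodup_keys_ofList d)).mp h))

theorem pvLk_mem {α : Type} {d : List (String × α)} {k : String} {v : α}
    (h : pvLk d k = some v) : k ∈ d.map Prod.fst :=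
  List.mem_map_of_mem (pvLk_pair_mem h)

theorem pvFilterLt {α : Type} {l : List α} {p q : α → Bool} (h : ∀ x, q x = true → p x = true)
    {x : α} (hx : x ∈ l) (hp : p x = true) (hq : q x = false) :
    (l.filter q).length < (l.filter p).length := by
  induction l with
  | nil => cases hx
  | cons a l ih =>
    rcases List.mem_cons.mp hx with rfl | hm
    · simp only [List.filter_cons, hp, hq]
      have hs : List.Sublist (l.filter q) (l.filter p) :=
        List.monotone_filter_right _ (fun y hy => h y hy)
      simpa using Nat.lt_succ_of_le hs.length_le
    · by_cases hqa : q a = true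
      · have hpa := h a hqa
        simp only [List.filter_cons, hqa, hpa, if_pos]
        simpa using ih hm
      · simp only [List.filter_cons, Bool.not_eq_true] at hqa ⊢
        simp only [hqa]
        rcases hpa : p a with _ | _
        · simpa using ih hm
        · simp; exact (ih hm).le

theorem pvM_lt {inv : List (String × List (String × List String))} {seen : List String} {g : String}
    (hk : g ∈ inv.map Prod.fst) (hs : g ∉ seen) : pvM inv (g :: seen) < pvM inv seen := by
  unfold pvM
  refine pvFilterLt (fun x hx => ?_) hk (by simp [hs]) (by simp)
  simp only [Bool.not_eq_true', List.contains_eq_mem, decide_eq_false_iff_not, List.mem_cons] at hx ⊢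
  exact fun hmem => hx (Or.inr hmem)

-- ===== PORT A =====
-- Literal transliteration of _get_groups_hosts_dict.  The `seen` argument (the recursion path)
-- is a termination device only: Python recurses unboundedly and raises RecursionError on cyclic
-- inventories, which Pre_ excludes; on every input Pre_ admits the guard is never taken.
mutual
def pvGghd (inv : List (String × List (String × List String))) (seen : List String) (g : String) :
    PySem.Dict String (List String) :=
  if hseen : g ∈ seen then ⟨[]⟩
  else
    match hfind : pvLk inv g with
    | none => ⟨[]⟩        -- Python raises KeyError (dynamic_inventory[g]); excluded by Pre_
    | some entry =>
      -- if 'hosts' in …: d[g] = []; d[g] += entry['hosts']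
      let d0 : PySem.Dict String (List String) :=
        if (pvLk entry "hosts").isSome then
          (PySem.Dict.empty).insert g ([] ++ (pvLk entry "hosts").getD [])
        else PySem.Dict.empty
      match pvLk entry "children" with
      | none => d0
      | some cs => pvGghdChildren inv (g :: seen) cs d0
termination_by (pvM inv seen, 0)
decreasing_by exact Prod.Lex.left _ _ (pvM_lt (pvLk_mem hfind) hseen)

-- for child in …['children']: d.update(_get_groups_hosts_dict(dynamic_inventory, child))
def pvGghdChildren (inv : List (String × List (String × List String))) (seen : List String)
    (cs : List String) (d : PySem.Dict String (List String)) : PySem.Dict String (List String) :=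
  match cs with
  | [] => d
  | c :: rest => pvGghdChildren inv seen rest (d.update (pvGghd inv seen c).items)
termination_by (pvM inv seen, cs.length + 1)
decreasing_by
  all_goals exact Prod.Lex.right _ (by simp only [List.length_cons]; omega)
end

-- Transliteration of _get_groups_hosts_string (A).
def get_groups_hosts_string_py (dynamic_inventory : List (String × List (String × List String))) : String :=
  let d := pvGghd dynamic_inventory [] "all"
  -- groups_hosts_dict['all'] raises KeyError when absent; excluded by Pre_ (ported as default [])
  let allHosts := (d.get? "all").getD []
  let s1 := allHosts.foldl (fun acc h => acc ++ (h ++ "\n")) ""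
  let s2 := s1 ++ "\n"
  let s3 := d.items.foldl (fun acc p =>
      if p.1 ≠ "all" then
        (p.2.foldl (fun a h => a ++ (h ++ "\n")) (acc ++ ("[" ++ p.1 ++ "]\n"))) ++ "\n"
      else acc) s2
  PySem.Str.rstrip s3

-- ===== PORT B =====
-- Transliteration of B's while loop.  Python's stack top is the list end; we keep the stack
-- reversed (top at the head), so `stack.extend(reversed(children))` becomes `children ++ rest`.
-- The path component of each stack entry is a termination device only (B's Python loop never
-- terminates on cyclic inventories, which Pre_ excludes); the group components, the visit order
-- and the produced values are exactly the Python's.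
def pvC (inv : List (String × List (String × List String))) : Nat :=
  ((inv.map (fun p => ((pvLk p.2 "children").getD []).length)).sum)
def pvBMeasure (inv : List (String × List (String × List String)))
    (stack : List (List String × String)) : Nat :=
  (stack.map (fun it => (pvC inv + 2) ^ (pvM inv it.1))).sum

theorem pvBMeasure_cons (inv : List (String × List (String × List String)))
    (path : List String) (g : String) (rest : List (List String × String)) :
    pvBMeasure inv ((path, g) :: rest) = (pvC inv + 2) ^ (pvM inv path) + pvBMeasure inv rest := by
  simp [pvBMeasure]

theorem pvBMeasure_tail_lt (inv : List (String × List (String × List String)))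
    (path : List String) (g : String) (rest : List (List String × String)) :
    pvBMeasure inv rest < pvBMeasure inv ((path, g) :: rest) := by
  rw [pvBMeasure_cons]
  have : 0 < (pvC inv + 2) ^ (pvM inv path) := Nat.pow_pos (by omega)
  omega

theorem pvCs_le {inv : List (String × List (String × List String))} {g : String}
    {entry : List (String × List String)} (h : pvLk inv g = some entry) :
    ((pvLk entry "children").getD []).length ≤ pvC inv := by
  have hm : (g, entry) ∈ inv := pvLk_pair_mem h
  exact List.single_le_sum (fun _ _ => Nat.zero_le _) _
    (List.mem_map_of_mem (f := fun p => ((pvLk p.2 "children").getD []).length) hm)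

theorem pvBMeasure_push_lt {inv : List (String × List (String × List String))}
    {path : List String} {g : String} {entry : List (String × List String)}
    (rest : List (List String × String))
    (hseen : g ∉ path) (hfind : pvLk inv g = some entry) :
    pvBMeasure inv (((pvLk entry "children").getD []).map (fun c => (g :: path, c)) ++ rest)
      < pvBMeasure inv ((path, g) :: rest) := by
  rw [pvBMeasure_cons]
  set cs := (pvLk entry "children").getD [] with hcs
  have hlen : cs.length ≤ pvC inv := pvCs_le hfind
  have hm : pvM inv (g :: path) < pvM inv path := pvM_lt (pvLk_mem hfind) hseen
  have hsum : pvBMeasure inv (cs.map (fun c => (g :: path, c)) ++ rest)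
      = cs.length * (pvC inv + 2) ^ (pvM inv (g :: path)) + pvBMeasure inv rest := by
    simp only [pvBMeasure, List.map_append, List.sum_append, List.map_map]
    have : (List.map ((fun it => (pvC inv + 2) ^ pvM inv it.1) ∘ fun c => ((g :: path, c) : List String × String)) cs)
        = List.replicate cs.length ((pvC inv + 2) ^ pvM inv (g :: path)) := by
      rw [← List.length_map (f := (fun it => (pvC inv + 2) ^ pvM inv it.1) ∘ fun c => ((g :: path, c) : List String × String))]
      apply List.eq_replicate_of_mem
      intro b hb
      simp only [List.mem_map] at hb
      obtain ⟨c, _, rfl⟩ := hb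
      rfl
    rw [this, List.sum_replicate, smul_eq_mul]
  rw [hsum]
  have hpow : (pvC inv + 2) ^ (pvM inv (g :: path)) ≤ (pvC inv + 2) ^ (pvM inv path - 1) :=
    Nat.pow_le_pow_right (by omega) (by omega)
  have hsplit : (pvC inv + 2) ^ (pvM inv path) = (pvC inv + 2) ^ (pvM inv path - 1) * (pvC inv + 2) := by
    rw [← Nat.pow_succ]
    congr 1
    omega
  have hkey : cs.length * (pvC inv + 2) ^ (pvM inv (g :: path)) < (pvC inv + 2) ^ (pvM inv path) := by
    calc cs.length * (pvC inv + 2) ^ (pvM inv (g :: path))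
        ≤ pvC inv * (pvC inv + 2) ^ (pvM inv path - 1) :=
          Nat.mul_le_mul hlen hpow
      _ < (pvC inv + 2) * (pvC inv + 2) ^ (pvM inv path - 1) := by
          have : 0 < (pvC inv + 2) ^ (pvM inv path - 1) := Nat.pow_pos (by omega)
          exact Nat.mul_lt_mul_of_lt_of_le (by omega) (le_refl _) this
      _ = (pvC inv + 2) ^ (pvM inv path) := by rw [hsplit]; ring
  omega

def pvBVisit (inv : List (String × List (String × List String)))
    (stack : List (List String × String)) (visits : List String) : List String :=
  match stack with
  | [] => visits
  | (path, g) :: rest =>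
    if hseen : g ∈ path then pvBVisit inv rest visits
    else
      match hfind : pvLk inv g with
      | none => pvBVisit inv rest visits     -- Python raises KeyError; excluded by Pre_
      | some entry =>
        let visits' := if (pvLk entry "hosts").isSome then visits ++ [g] else visits
        let cs := (pvLk entry "children").getD []
        pvBVisit inv (cs.map (fun c => (g :: path, c)) ++ rest) visits'
termination_by pvBMeasure inv stack
decreasing_by
  · exact pvBMeasure_tail_lt inv path g rest
  · exact pvBMeasure_tail_lt inv path g rest
  · exact pvBMeasure_push_lt rest hseen hfind

-- Transliteration of B's formatting phase.
def get_groups_hosts_string_py_alt (dynamic_inventory : List (String × List (String × List String))) : String :=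
  let visits := pvBVisit dynamic_inventory [([], "all")] []
  let order := PySem.List.dedup visits          -- list(dict.fromkeys(visits))
  -- dynamic_inventory['all']['hosts'] raises KeyError when absent; excluded by Pre_
  let lines0 := (pvLk ((pvLk dynamic_inventory "all").getD []) "hosts").getD [] ++ [""]
  let lines := order.foldl (fun ls g =>
      if g ≠ "all" then
        ls ++ (("[" ++ g ++ "]") :: ((pvLk ((pvLk dynamic_inventory g).getD []) "hosts").getD [] ++ [""]))
      else ls) lines0
  PySem.Str.rstrip (PySem.Str.join "\n" lines)

-- ===== PRECONDITION & SPEC =====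
def pvChildrenOf (inv : List (String × List (String × List String))) (g : String) : List String :=
  (pvLk ((pvLk inv g).getD []) "children").getD []
def pvNames (inv : List (String × List (String × List String))) : List String :=
  inv.map Prod.fst ++ inv.flatMap (fun p => (pvLk p.2 "children").getD [])
def pvStep (inv : List (String × List (String × List String))) (S : List String) : List String :=
  PySem.List.dedup (S ++ S.flatMap (pvChildrenOf inv))
def pvReach (inv : List (String × List (String × List String))) : List String :=
  (pvStep inv)^[(pvNames inv).length + 1] ["all"]
-- groups from which every chain of 'children' links is finite (no reachable cycle below them)
def pvGrounded (inv : List (String × List (String × List String))) : List String :=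
  (fun G => (pvNames inv).filter (fun g => (pvChildrenOf inv g).all (· ∈ G)))^[(pvNames inv).length + 1] []

-- Pre_ admits exactly the inventories on which Python A returns: 'all' is defined and carries a
-- 'hosts' entry (else KeyError), every group reachable from 'all' via 'children' links is defined
-- (else KeyError), and no cycle of 'children' links is reachable from 'all' (else RecursionError).
def Pre_get_groups_hosts_string_py (dynamic_inventory : List (String × List (String × List String))) : Prop :=
  (pvLk dynamic_inventory "all").isSome = true ∧
  (pvLk ((pvLk dynamic_inventory "all").getD []) "hosts").isSome = true ∧
  (∀ g ∈ pvReach dynamic_inventory, (pvLk dynamic_inventory g).isSome = true) ∧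
  "all" ∈ pvGrounded dynamic_inventory
instance (dynamic_inventory : List (String × List (String × List String))) : Decidable (Pre_get_groups_hosts_string_py dynamic_inventory) := by unfold Pre_get_groups_hosts_string_py; infer_instance

def pvWitness_get_groups_hosts_string_py : (List (String × List (String × List String))) :=
  [("all", [("hosts", ["deployer"]), ("children", ["client", "dbs"])]),
   ("client", [("hosts", ["c1", "c2"])]),
   ("dbs", [("hosts", ["d1"]), ("children", ["client"])])]

def Spec_get_groups_hosts_string_py (dynamic_inventory : List (String × List (String × List String))) (out : String) : Prop := out = get_groups_hosts_string_py_alt dynamic_inventory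
instance (dynamic_inventory : List (String × List (String × List String))) (out : String) : Decidable (Spec_get_groups_hosts_string_py dynamic_inventory out) := by unfold Spec_get_groups_hosts_string_py; infer_instance

-- ===== CLAIM (what is proved, stated in full; the proofs are below) =====
def Claim_equal_get_groups_hosts_string_py : Prop := ∀ (dynamic_inventory : List (String × List (String × List String))), Dom_get_groups_hosts_string_py dynamic_inventory → Pre_get_groups_hosts_string_py dynamic_inventory → Spec_get_groups_hosts_string_py dynamic_inventory (get_groups_hosts_string_py dynamic_inventory)

-- ===== LEMMAS AND PROOFS =====





def pvHostsOf (inv : List (String × List (String × List String))) (k : String) : List String :=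
  (pvLk ((pvLk inv k).getD []) "hosts").getD []

def pvKV (inv : List (String × List (String × List String))) (k : String) : String × List String :=
  (k, pvHostsOf inv k)

def pvV (inv : List (String × List (String × List String))) (seen : List String) (g : String) : List String :=
  pvBVisit inv [(seen, g)] []

theorem pvBVisit_nil (inv : List (String × List (String × List String))) (visits : List String) :
    pvBVisit inv [] visits = visits := by
  rw [pvBVisit.eq_def]

theorem pvBVisit_seen (inv : List (String × List (String × List String))) {path : List String} {g : String}
    (rest : List (List String × String)) (visits : List String) (h : g ∈ path) :
    pvBVisit inv ((path, g) :: rest) visits = pvBVisit inv rest visits := by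
  rw [pvBVisit.eq_def]
  simp [h]

theorem pvBVisit_missing (inv : List (String × List (String × List String))) {path : List String} {g : String}
    (rest : List (List String × String)) (visits : List String) (h : g ∉ path) (h2 : pvLk inv g = none) :
    pvBVisit inv ((path, g) :: rest) visits = pvBVisit inv rest visits := by
  rw [pvBVisit.eq_def]
  dsimp only
  rw [dif_neg h]
  split
  · rfl
  · rename_i entry heq; rw [h2] at heq; cases heq

theorem pvBVisit_found (inv : List (String × List (String × List String))) {path : List String} {g : String}
    {entry : List (String × List String)}
    (rest : List (List String × String)) (visits : List String) (h : g ∉ path) (h2 : pvLk inv g = some entry) :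
    pvBVisit inv ((path, g) :: rest) visits =
      pvBVisit inv ((((pvLk entry "children").getD []).map (fun c => (g :: path, c))) ++ rest)
        (if (pvLk entry "hosts").isSome then visits ++ [g] else visits) := by
  rw [pvBVisit.eq_def]
  dsimp only
  rw [dif_neg h]
  split
  · rename_i heq; rw [h2] at heq; cases heq
  · rename_i e heq; rw [h2] at heq; cases heq; rfl

theorem pvBVisit_acc (inv : List (String × List (String × List String))) :
    ∀ (stack : List (List String × String)) (visits : List String),
      pvBVisit inv stack visits = visits ++ pvBVisit inv stack [] := by
  suffices H : ∀ (n : Nat) (stack : List (List String × String)) (visits : List String),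
      pvBMeasure inv stack < n → pvBVisit inv stack visits = visits ++ pvBVisit inv stack [] by
    exact fun s v => H (pvBMeasure inv s + 1) s v (Nat.lt_succ_self _)
  intro n
  induction n with
  | zero => intro stack visits h; omega
  | succ n ih =>
    intro stack visits hlt
    match stack with
    | [] => simp [pvBVisit_nil]
    | (path, g) :: rest =>
      by_cases hseen : g ∈ path
      · have hm := pvBMeasure_tail_lt inv path g rest
        rw [pvBVisit_seen inv rest visits hseen, pvBVisit_seen inv rest [] hseen,
          ih rest visits (by omega)]
      · cases hfind : pvLk inv g with
        | none =>
          have hm := pvBMeasure_tail_lt inv path g rest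
          rw [pvBVisit_missing inv rest visits hseen hfind,
            pvBVisit_missing inv rest [] hseen hfind, ih rest visits (by omega)]
        | some entry =>
          have hm := pvBMeasure_push_lt (inv := inv) (path := path) (g := g) rest hseen hfind
          have hm2 := pvBMeasure_tail_lt inv path g rest
          rw [pvBVisit_found inv rest visits hseen hfind,
            pvBVisit_found inv rest [] hseen hfind,
            ih _ (if (pvLk entry "hosts").isSome then visits ++ [g] else visits) (by omega),
            ih _ (if (pvLk entry "hosts").isSome then [] ++ [g] else []) (by omega)]
          by_cases hh : (pvLk entry "hosts").isSome
          · simp [hh]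
          · simp [hh]

theorem pvBVisit_append (inv : List (String × List (String × List String))) :
    ∀ (s1 s2 : List (List String × String)),
      pvBVisit inv (s1 ++ s2) [] = pvBVisit inv s1 [] ++ pvBVisit inv s2 [] := by
  suffices H : ∀ (n : Nat) (s1 s2 : List (List String × String)),
      pvBMeasure inv s1 < n → pvBVisit inv (s1 ++ s2) [] = pvBVisit inv s1 [] ++ pvBVisit inv s2 [] by
    exact fun s1 s2 => H (pvBMeasure inv s1 + 1) s1 s2 (Nat.lt_succ_self _)
  intro n
  induction n with
  | zero => intro s1 s2 h; omega
  | succ n ih =>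
    intro s1 s2 hlt
    match s1 with
    | [] => simp [pvBVisit_nil]
    | (path, g) :: rest =>
      by_cases hseen : g ∈ path
      · have hm := pvBMeasure_tail_lt inv path g rest
        rw [List.cons_append, pvBVisit_seen inv _ [] hseen, pvBVisit_seen inv rest [] hseen,
          ih rest s2 (by omega)]
      · cases hfind : pvLk inv g with
        | none =>
          have hm := pvBMeasure_tail_lt inv path g rest
          rw [List.cons_append, pvBVisit_missing inv _ [] hseen hfind,
            pvBVisit_missing inv rest [] hseen hfind, ih rest s2 (by omega)]
        | some entry =>
          have hm := pvBMeasure_push_lt (inv := inv) (path := path) (g := g) rest hseen hfind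
          rw [List.cons_append, pvBVisit_found inv _ [] hseen hfind,
            pvBVisit_found inv rest [] hseen hfind]
          rw [pvBVisit_acc inv _ (if (pvLk entry "hosts").isSome then [] ++ [g] else []),
            pvBVisit_acc inv
              (List.map (fun c => (g :: path, c)) ((pvLk entry "children").getD []) ++ rest)
              (if (pvLk entry "hosts").isSome then [] ++ [g] else [])]
          rw [← List.append_assoc, ih _ s2 (by omega)]
          simp

theorem pvV_eq (inv : List (String × List (String × List String))) (seen : List String) (g : String) :
    pvV inv seen g =
      if g ∈ seen then []
      else
        match pvLk inv g with
        | none => []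
        | some entry =>
            (if (pvLk entry "hosts").isSome then [g] else []) ++
              ((pvLk entry "children").getD []).flatMap (fun c => pvV inv (g :: seen) c) := by
  by_cases hseen : g ∈ seen
  · simp only [hseen, if_true]
    unfold pvV
    rw [pvBVisit_seen inv [] [] hseen, pvBVisit_nil]
  · simp only [hseen, if_false]
    cases hfind : pvLk inv g with
    | none =>
      unfold pvV
      rw [pvBVisit_missing inv [] [] hseen hfind, pvBVisit_nil]
    | some entry =>
      unfold pvV
      rw [pvBVisit_found inv [] [] hseen hfind, List.append_nil, pvBVisit_acc]
      have hflat : ∀ (cs : List String),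
          pvBVisit inv (cs.map (fun c => (g :: seen, c))) [] =
            cs.flatMap (fun c => pvV inv (g :: seen) c) := by
        intro cs
        induction cs with
        | nil => simp [pvBVisit_nil]
        | cons c cr ihc =>
          have : ((c :: cr).map (fun c => (g :: seen, c))) =
              [(g :: seen, c)] ++ cr.map (fun c => (g :: seen, c)) := by simp
          rw [this, pvBVisit_append, ihc]
          simp [pvV]
      rw [hflat]
      by_cases hh : (pvLk entry "hosts").isSome
      · simp [hh, pvV]
      · simp [hh, pvV]

-- first-occurrence "new elements" of l relative to s (the tail PySem.Set.update appends)
def pvNews (s l : List String) : List String :=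
  match l with
  | [] => []
  | x :: r => if x ∈ s then pvNews s r else x :: pvNews (s ++ [x]) r

theorem pvSet_update_eq_news (l s : List String) :
    PySem.Set.update s l = s ++ pvNews s l := by
  induction l generalizing s with
  | nil => simp [PySem.Set.update, pvNews]
  | cons x r ih =>
    show PySem.Set.update (PySem.Set.add s x) r = _
    by_cases hx : x ∈ s
    · rw [show PySem.Set.add s x = s by simp [PySem.Set.add, hx]]
      rw [ih s]
      simp [pvNews, hx]
    · rw [show PySem.Set.add s x = s ++ [x] by simp [PySem.Set.add, hx]]
      rw [ih (s ++ [x])]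
      simp [pvNews, hx]

theorem pvNews_news (l : List String) : ∀ (s t : List String), (∀ x ∈ t, x ∈ s) →
    pvNews s (pvNews t l) = pvNews s l := by
  induction l with
  | nil => intro s t _; rfl
  | cons x r ih =>
    intro s t hts
    by_cases hxt : x ∈ t
    · simp [pvNews, hxt, hts x hxt, ih s t hts]
    · by_cases hxs : x ∈ s
      · have hsub : ∀ y ∈ t ++ [x], y ∈ s := by
          intro y hy
          rcases List.mem_append.mp hy with h | h
          · exact hts y h
          · simp at h; subst h; exact hxs
        show pvNews s (if x ∈ t then pvNews t r else x :: pvNews (t ++ [x]) r) = _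
        rw [if_neg hxt]
        show (if x ∈ s then pvNews s (pvNews (t ++ [x]) r) else x :: pvNews (s ++ [x]) (pvNews (t ++ [x]) r)) = _
        rw [if_pos hxs, ih s (t ++ [x]) hsub]
        simp [pvNews, hxs]
      · simp only [pvNews, hxt, hxs, if_false]
        refine congrArg _ ?_
        rw [ih (s ++ [x]) (t ++ [x])]
        intro y hy
        rcases List.mem_append.mp hy with h | h
        · exact List.mem_append.mpr (Or.inl (hts y h))
        · exact List.mem_append.mpr (Or.inr h)

theorem pvSet_update_ofList (L v : List String) :
    PySem.Set.update L (PySem.Set.ofList v) = PySem.Set.update L v := by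
  have h0 : PySem.Set.ofList v = pvNews [] v := by
    have := pvSet_update_eq_news v []
    simpa [PySem.Set.update, PySem.Set.ofList, PySem.Set.empty] using this
  rw [h0, pvSet_update_eq_news (pvNews [] v) L, pvNews_news v L [] (by simp),
    ← pvSet_update_eq_news v L]

theorem pvSet_update_append (s a b : List String) :
    PySem.Set.update s (a ++ b) = PySem.Set.update (PySem.Set.update s a) b :=
  List.foldl_append

theorem pvAny_beq (L : List String) (k : String) : (L.any fun x => x == k) = decide (k ∈ L) := by
  induction L with
  | nil => simp
  | cons a L ih =>
    simp only [List.any_cons, ih, List.mem_cons]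
    by_cases hak : a = k
    · subst hak; simp
    · have h2 : ¬ (k = a) := fun hc => hak hc.symm
      simp [hak, h2, beq_iff_eq]

theorem pvDict_contains_map (inv : List (String × List (String × List String)))
    (L : List String) (d : PySem.Dict String (List String)) (h : d.items = L.map (pvKV inv))
    (k : String) : d.contains k = decide (k ∈ L) := by
  show d.items.any (fun p => p.1 == k) = decide (k ∈ L)
  rw [h, List.any_map]
  have : ((fun (p : String × List String) => p.1 == k) ∘ pvKV inv) = fun x => x == k := by
    funext x; simp [pvKV]
  rw [this, pvAny_beq]

theorem pvDict_update_map (inv : List (String × List (String × List String))) (M : List String) :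
    ∀ (L : List String) (d : PySem.Dict String (List String)),
      d.items = L.map (pvKV inv) →
      (d.update (M.map (pvKV inv))).items = (PySem.Set.update L M).map (pvKV inv) := by
  induction M with
  | nil => intro L d h; simpa [PySem.Dict.update, PySem.Set.update] using h
  | cons m M ih =>
    intro L d h
    have hstep : (PySem.Dict.update d ((m :: M).map (pvKV inv)))
        = PySem.Dict.update (d.insert m (pvHostsOf inv m)) (M.map (pvKV inv)) := by
      simp [PySem.Dict.update, pvKV]
    have hsetstep : PySem.Set.update L (m :: M) = PySem.Set.update (PySem.Set.add L m) M := rfl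
    rw [hstep, hsetstep]
    by_cases hm : m ∈ L
    · have hc : d.contains m = true := by
        rw [pvDict_contains_map inv L d h m]; simp [hm]
      apply ih
      rw [PySem.Dict.items_insert_of_contains d _ hc, h, List.map_map]
      have hadd : PySem.Set.add L m = L := by
        simp [PySem.Set.add, PySem.Set.contains, hm]
      rw [hadd]
      apply List.map_congr_left
      intro k hk
      by_cases hkm : k = m
      · subst hkm; simp [pvKV]
      · simp [pvKV, hkm]
    · have hc : d.contains m = false := by
        rw [pvDict_contains_map inv L d h m]; simp [hm]
      apply ih
      rw [PySem.Dict.items_insert_of_not_contains d _ hc, h]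
      have hadd : PySem.Set.add L m = L ++ [m] := by
        simp [PySem.Set.add, PySem.Set.contains, hm]
      rw [hadd]
      simp [pvKV]

theorem pvGghd_seen (inv : List (String × List (String × List String))) {seen : List String}
    {g : String} (h : g ∈ seen) : pvGghd inv seen g = ⟨[]⟩ := by
  rw [pvGghd.eq_def]
  simp [h]

theorem pvGghd_missing (inv : List (String × List (String × List String))) {seen : List String}
    {g : String} (h : g ∉ seen) (h2 : pvLk inv g = none) : pvGghd inv seen g = ⟨[]⟩ := by
  rw [pvGghd.eq_def]
  dsimp only
  rw [dif_neg h]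
  split
  · rfl
  · rename_i e heq; rw [h2] at heq; cases heq

theorem pvGghd_found (inv : List (String × List (String × List String))) {seen : List String}
    {g : String} {entry : List (String × List String)} (h : g ∉ seen)
    (h2 : pvLk inv g = some entry) :
    pvGghd inv seen g =
      (match pvLk entry "children" with
       | none =>
          (if (pvLk entry "hosts").isSome then
            (PySem.Dict.empty).insert g ([] ++ (pvLk entry "hosts").getD [])
          else PySem.Dict.empty)
       | some cs => pvGghdChildren inv (g :: seen) cs
          (if (pvLk entry "hosts").isSome then
            (PySem.Dict.empty).insert g ([] ++ (pvLk entry "hosts").getD [])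
          else PySem.Dict.empty)) := by
  rw [pvGghd.eq_def]
  dsimp only
  rw [dif_neg h]
  split
  · rename_i heq; rw [h2] at heq; cases heq
  · rename_i e heq; rw [h2] at heq; cases heq; rfl

theorem pvGghdChildren_nil (inv : List (String × List (String × List String))) (seen : List String)
    (d : PySem.Dict String (List String)) : pvGghdChildren inv seen [] d = d := by
  rw [pvGghdChildren.eq_def]

theorem pvGghdChildren_cons (inv : List (String × List (String × List String))) (seen : List String)
    (c : String) (rest : List String) (d : PySem.Dict String (List String)) :
    pvGghdChildren inv seen (c :: rest) d =
      pvGghdChildren inv seen rest (d.update (pvGghd inv seen c).items) := by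
  rw [pvGghdChildren.eq_def]

theorem pvGghdChildren_items (inv : List (String × List (String × List String))) (seen' : List String)
    (IH : ∀ c, (pvGghd inv seen' c).items = (PySem.Set.ofList (pvV inv seen' c)).map (pvKV inv)) :
    ∀ (cs : List String) (L : List String) (d : PySem.Dict String (List String)),
      d.items = L.map (pvKV inv) →
      (pvGghdChildren inv seen' cs d).items
        = (PySem.Set.update L (cs.flatMap (fun c => pvV inv seen' c))).map (pvKV inv) := by
  intro cs
  induction cs with
  | nil =>
    intro L d h
    rw [pvGghdChildren_nil]
    simpa [PySem.Set.update] using h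
  | cons c rest ih =>
    intro L d h
    rw [pvGghdChildren_cons, ih (PySem.Set.update L (pvV inv seen' c))]
    · rw [List.flatMap_cons, pvSet_update_append]
    · rw [IH c, pvDict_update_map inv _ L d h, pvSet_update_ofList]

theorem pvGghd_items (inv : List (String × List (String × List String))) :
    ∀ (seen : List String) (g : String),
      (pvGghd inv seen g).items = (PySem.Set.ofList (pvV inv seen g)).map (pvKV inv) := by
  suffices H : ∀ (n : Nat) (seen : List String) (g : String), pvM inv seen < n →
      (pvGghd inv seen g).items = (PySem.Set.ofList (pvV inv seen g)).map (pvKV inv) by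
    exact fun seen g => H (pvM inv seen + 1) seen g (Nat.lt_succ_self _)
  intro n
  induction n with
  | zero => intro seen g h; omega
  | succ n ih =>
    intro seen g hlt
    by_cases hseen : g ∈ seen
    · rw [pvGghd_seen inv hseen, pvV_eq, if_pos hseen]
      rfl
    · cases hfind : pvLk inv g with
      | none =>
        rw [pvGghd_missing inv hseen hfind, pvV_eq, if_neg hseen, hfind]
        rfl
      | some entry =>
        have hbase : (if (pvLk entry "hosts").isSome then
              (PySem.Dict.empty).insert g ([] ++ (pvLk entry "hosts").getD [])
            else (PySem.Dict.empty : PySem.Dict String (List String))).items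
            = (if (pvLk entry "hosts").isSome then [g] else []).map (pvKV inv) := by
          by_cases hh : (pvLk entry "hosts").isSome
          · simp only [hh, if_true]
            rw [PySem.Dict.items_insert_of_not_contains _ _ (by rfl)]
            simp [pvKV, pvHostsOf, hfind, PySem.Dict.empty]
          · simp [hh, PySem.Dict.empty]
        have hbaseset : PySem.Set.ofList (if (pvLk entry "hosts").isSome then [g] else []) =
            (if (pvLk entry "hosts").isSome then [g] else []) := by
          by_cases hh : (pvLk entry "hosts").isSome <;>
            simp [hh, PySem.Set.ofList, PySem.Set.add, PySem.Set.empty, PySem.Set.contains]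
        rw [pvGghd_found inv hseen hfind, pvV_eq, if_neg hseen, hfind]
        cases hch : pvLk entry "children" with
        | none =>
          rw [hbase]
          simp only [hch, Option.getD_none, List.flatMap_nil, List.append_nil]
          rw [hbaseset]
        | some cs =>
          rw [pvGghdChildren_items inv (g :: seen)
                (fun c => ih (g :: seen) c
                  (by have := pvM_lt (pvLk_mem hfind) hseen; omega))
                cs _ _ hbase]
          simp only [hch, Option.getD_some]
          congr 1
          have h1 : PySem.Set.ofList
              ((if (pvLk entry "hosts").isSome then [g] else []) ++
                cs.flatMap (fun c => pvV inv (g :: seen) c)) =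
              PySem.Set.update
                (PySem.Set.ofList (if (pvLk entry "hosts").isSome then [g] else []))
                (cs.flatMap (fun c => pvV inv (g :: seen) c)) := by
            show PySem.Set.update PySem.Set.empty _ = _
            rw [pvSet_update_append]
            rfl
          rw [h1, hbaseset]

theorem pvDict_get?_map (inv : List (String × List (String × List String))) :
    ∀ (L : List String) (d : PySem.Dict String (List String)),
      d.items = L.map (pvKV inv) → ∀ (k : String),
      d.get? k = if k ∈ L then some (pvHostsOf inv k) else none := by
  intro L
  induction L with
  | nil => intro d h k; show (d.items.find? _).map _ = _; rw [h]; simp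
  | cons a L ih =>
    intro d h k
    show (d.items.find? (fun p => p.1 == k)).map (·.2) = _
    rw [h]
    simp only [List.map_cons, List.find?_cons]
    by_cases hak : (pvKV inv a).1 == k
    · have : a = k := by simpa [pvKV] using hak
      subst this
      simp [hak, pvKV]
    · have hne : ¬ (k = a) := by
        intro hc; subst hc; simp [pvKV] at hak
      simp only [hak]
      have := ih ⟨L.map (pvKV inv)⟩ rfl k
      simp only [PySem.Dict.get?] at this
      rw [this]
      simp [List.mem_cons, hne]

theorem pvAllHosts (inv : List (String × List (String × List String))) :
    ((pvGghd inv [] "all").get? "all").getD [] = pvHostsOf inv "all" := by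
  rw [pvDict_get?_map inv (PySem.Set.ofList (pvV inv [] "all")) _ (pvGghd_items inv [] "all") "all"]
  by_cases hmem : "all" ∈ PySem.Set.ofList (pvV inv [] "all")
  · simp [hmem]
  · simp only [hmem, if_neg, if_false, Option.getD_none]
    have hnv : "all" ∉ pvV inv [] "all" := fun hc =>
      hmem ((PySem.Set.mem_ofList _ _).mpr hc)
    rw [pvV_eq] at hnv
    simp only [List.not_mem_nil, if_false] at hnv
    cases hfind : pvLk inv "all" with
    | none =>
      unfold pvHostsOf
      rw [hfind]
      simp [pvLk, PySem.Dict.ofList, PySem.Dict.update, PySem.Dict.empty, PySem.Dict.get?]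
    | some entry =>
      rw [hfind] at hnv
      by_cases hh : (pvLk entry "hosts").isSome
      · exact absurd (by simp [hh] : "all" ∈ _) hnv
      · rw [Option.not_isSome_iff_eq_none] at hh
        simp [pvHostsOf, hfind, hh]

def pvLines (ls : List (List Char)) : List Char := ls.flatMap (fun l => l ++ ['\n'])

theorem pvLines_append (a b : List (List Char)) : pvLines (a ++ b) = pvLines a ++ pvLines b := by
  simp [pvLines]

theorem pvFold_hosts (hs : List String) : ∀ (init : String),
    (hs.foldl (fun a h => a ++ (h ++ "\n")) init).toList
      = init.toList ++ pvLines (hs.map String.toList) := by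
  induction hs with
  | nil => intro init; simp [pvLines]
  | cons h hs ih =>
    intro init
    rw [List.foldl_cons, ih]
    simp [pvLines, String.toList_append]

theorem pvIntercalate_newline : ∀ (ls : List (List Char)), ls ≠ [] →
    List.intercalate ['\n'] ls ++ ['\n'] = pvLines ls := by
  intro ls
  induction ls with
  | nil => intro h; cases h rfl
  | cons x r ih =>
    intro _
    cases r with
    | nil => simp [List.intercalate, pvLines]
    | cons y s =>
      have hicc : List.intercalate ['\n'] (x :: y :: s) = x ++ ['\n'] ++ List.intercalate ['\n'] (y :: s) := by
        simp [List.intercalate, List.intersperse]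
      rw [hicc]
      have := ih (by simp)
      simp only [pvLines, List.flatMap_cons] at this ⊢
      rw [List.append_assoc, List.append_assoc, this]
      simp

theorem pvRstrip_newline (x : List Char) :
    PySem.Chars.rstrip (x ++ ['\n']) = PySem.Chars.rstrip x := by
  show (List.dropWhile PySem.Chars.isspace (x ++ ['\n']).reverse).reverse = _
  rw [List.reverse_append]
  simp only [List.reverse_cons, List.reverse_nil, List.nil_append, List.singleton_append,
    List.dropWhile_cons]
  rw [if_pos (by decide : PySem.Chars.isspace '\n' = true)]
  rfl

theorem pvFold_groups (inv : List (String × List (String × List String))) :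
    ∀ (L : List String) (acc : String) (ls : List String),
      acc.toList = pvLines (ls.map String.toList) →
      ((L.map (pvKV inv)).foldl (fun acc p =>
          if p.1 ≠ "all" then
            (p.2.foldl (fun a h => a ++ (h ++ "\n")) (acc ++ ("[" ++ p.1 ++ "]\n"))) ++ "\n"
          else acc) acc).toList
        = pvLines ((L.foldl (fun ls g =>
            if g ≠ "all" then
              ls ++ (("[" ++ g ++ "]") :: ((pvLk ((pvLk inv g).getD []) "hosts").getD [] ++ [""]))
            else ls) ls).map String.toList) := by
  intro L
  induction L with
  | nil => intro acc ls h; simpa using h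
  | cons k L ih =>
    intro acc ls h
    simp only [List.map_cons, List.foldl_cons]
    by_cases hk : k ≠ "all"
    · simp only [pvKV, hk, ne_eq, not_false_iff, if_pos, if_true]
      apply ih
      rw [String.toList_append, pvFold_hosts]
      simp only [String.toList_append, List.map_append, pvLines_append, h]
      show _ = pvLines (ls.map String.toList) ++
        pvLines ((("[" ++ k ++ "]") :: (pvHostsOf inv k ++ [""])).map String.toList)
      simp only [List.map_cons, List.map_append, pvLines, List.flatMap_cons, List.flatMap_append,
        String.toList_append]
      simp [pvHostsOf]
    · simp only [ne_eq, not_not] at hk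
      subst hk
      simp only [pvKV, ne_eq, not_true, if_neg, if_false]
      exact ih acc ls h

theorem pvFoldB_len (inv : List (String × List (String × List String))) :
    ∀ (L : List String) (ls : List String),
      ls.length ≤ (L.foldl (fun ls g =>
        if g ≠ "all" then
          ls ++ (("[" ++ g ++ "]") :: ((pvLk ((pvLk inv g).getD []) "hosts").getD [] ++ [""]))
        else ls) ls).length := by
  intro L
  induction L with
  | nil => intro ls; simp
  | cons k L ih =>
    intro ls
    rw [List.foldl_cons]
    by_cases hk : k ≠ "all"
    · refine le_trans ?_ (ih _)
      simp [hk]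
    · simp only [hk, if_neg, if_false]
      exact ih ls

theorem pvMain (inv : List (String × List (String × List String))) :
    get_groups_hosts_string_py inv = get_groups_hosts_string_py_alt inv := by
  unfold get_groups_hosts_string_py get_groups_hosts_string_py_alt
  simp only []
  apply String.ext
  rw [PySem.Str.toList_rstrip, PySem.Str.toList_rstrip]
  rw [pvAllHosts inv]
  rw [pvGghd_items inv [] "all"]
  have hvis : pvBVisit inv [([], "all")] [] = pvV inv [] "all" := rfl
  rw [hvis, PySem.List.dedup_eq_ofList]
  have hlines0 : (pvLk ((pvLk inv "all").getD []) "hosts").getD [] = pvHostsOf inv "all" := rfl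
  rw [hlines0]
  set H := pvHostsOf inv "all" with hH
  set OL := PySem.Set.ofList (pvV inv [] "all") with hOL
  set lines := OL.foldl (fun ls g =>
      if g ≠ "all" then
        ls ++ (("[" ++ g ++ "]") :: ((pvLk ((pvLk inv g).getD []) "hosts").getD [] ++ [""]))
      else ls) (H ++ [""]) with hlinesdef
  have hs2 : ((H.foldl (fun acc h => acc ++ (h ++ "\n")) "") ++ "\n").toList
      = pvLines ((H ++ [""]).map String.toList) := by
    rw [String.toList_append, pvFold_hosts]
    simp [pvLines_append, pvLines]
  have hs3 := pvFold_groups inv OL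
    ((H.foldl (fun acc h => acc ++ (h ++ "\n")) "") ++ "\n") (H ++ [""]) hs2
  rw [hs3]
  have hne : lines ≠ [] := by
    have := pvFoldB_len inv OL (H ++ [""])
    rw [← hlinesdef] at this
    intro hc
    rw [hc] at this
    simp at this
  rw [PySem.Str.toList_join]
  have hjoin : PySem.Chars.join ("\n".toList) (lines.map String.toList) ++ ['\n']
      = pvLines (lines.map String.toList) := by
    show List.intercalate ['\n'] (lines.map String.toList) ++ ['\n'] = _
    apply pvIntercalate_newline
    simpa using hne
  rw [← hjoin, pvRstrip_newline]

-- ===== VERDICT (by name: the statement is the Claim_ definition above) =====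
theorem get_groups_hosts_string_py_spec : Claim_equal_get_groups_hosts_string_py := by
  intro dynamic_inventory _hDom _hPre
  unfold Spec_get_groups_hosts_string_py
  exact pvMain dynamic_inventory
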